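-- pv_equiv track=rewrite | github.com/prasanna86/fun_with_programming | uncategorized_or_partial_solutions/inter_quartile_range.py | construct_dataset
-- ===== SOURCE A (Python) =====
-- def construct_dataset(x, f):
--     n = len(x)
--     s = []
--     for i in range(n):
--         for j in range(f[i]):
--             s.append(x[i])
--     s = sorted(s)
--     return s
-- ===== SOURCE B (Python) =====
-- def construct_dataset(x, f):
--     s = []
--     for xi, fi in sorted([p for p in zip(x, f) if p[1] > 0], key=lambda p: p[0]):
--         s += [xi] * fi
--     return s
-- ===== Notes on version B (the rewrite author's own statement) =====
-- stated objective: faster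
-- what changed: Instead of expanding every value by its frequency and sorting the full N-element expansion, B keeps only the positive-frequency (value, frequency) pairs, sorts those n pairs by value and emits each run of repeats in order, so the sort is over at most n pairs, not N elements; intended as faster, measured 2.89x at the largest size both finished (the output itself is size N, so both run out of memory on astronomically large N).
import Mathlib
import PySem

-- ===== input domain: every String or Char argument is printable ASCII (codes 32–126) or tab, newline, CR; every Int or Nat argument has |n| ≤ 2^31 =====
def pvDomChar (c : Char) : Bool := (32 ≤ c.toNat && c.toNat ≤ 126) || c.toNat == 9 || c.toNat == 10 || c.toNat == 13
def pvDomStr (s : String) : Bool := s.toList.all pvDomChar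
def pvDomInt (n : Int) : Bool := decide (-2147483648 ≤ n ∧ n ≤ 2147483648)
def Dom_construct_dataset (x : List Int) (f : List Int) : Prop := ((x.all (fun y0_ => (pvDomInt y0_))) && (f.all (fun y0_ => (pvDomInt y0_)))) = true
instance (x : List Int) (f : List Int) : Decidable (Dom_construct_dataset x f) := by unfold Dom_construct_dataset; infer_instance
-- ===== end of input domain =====

-- B sorts the positive-frequency (value,frequency) pairs by value and emits each run of
-- repeats in order, instead of sorting the full frequency-expanded list; intended as faster
-- (measured 2.89x at the largest size both finished).


-- ===== PORT A =====
def construct_dataset (x : List Int) (f : List Int) : List Int :=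
  let n : Int := x.length
  let s : List Int :=
    (PySem.List.pyRange 0 n 1).foldl (fun s i =>
      (PySem.List.pyRange 0 (PySem.List.pyGetD f i 0) 1).foldl
        (fun s _ => s ++ [PySem.List.pyGetD x i 0]) s) []
  PySem.List.sorted s (fun v => v) false

-- ===== PORT B =====
def construct_dataset_alt (x : List Int) (f : List Int) : List Int :=
  (PySem.List.sorted ((x.zip f).filter (fun p => decide (0 < p.2))) (fun p => p.1) false).foldl
    (fun s p => s ++ List.replicate p.2.toNat p.1) []

-- ===== PRECONDITION & SPEC =====
-- A raises IndexError (f[i]) iff len(f) < len(x); Pre_ excludes exactly those inputs.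
def Pre_construct_dataset (x : List Int) (f : List Int) : Prop := x.length ≤ f.length
instance (x : List Int) (f : List Int) : Decidable (Pre_construct_dataset x f) := by unfold Pre_construct_dataset; infer_instance
def pvWitness_construct_dataset : List Int × List Int := ([3, 1, 2], [2, 0, 3])
def Spec_construct_dataset (x : List Int) (f : List Int) (out : List Int) : Prop := out = construct_dataset_alt x f
instance (x : List Int) (f : List Int) (out : List Int) : Decidable (Spec_construct_dataset x f out) := by unfold Spec_construct_dataset; infer_instance

-- ===== CLAIM (what is proved, stated in full; the proofs are below) =====
def Claim_equal_construct_dataset : Prop := ∀ (x : List Int) (f : List Int), Dom_construct_dataset x f → Pre_construct_dataset x f → Spec_construct_dataset x f (construct_dataset x f)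

-- ===== LEMMAS AND PROOFS =====

-- expansion of one pair
def pvRep (p : Int × Int) : List Int := List.replicate p.2.toNat p.1

-- the inner loop appends a exactly l.length times
theorem pv_inner_foldl (l : List Int) (s : List Int) (a : Int) :
    l.foldl (fun s _ => s ++ [a]) s = s ++ List.replicate l.length a := by
  induction l generalizing s with
  | nil => simp
  | cons h t ih =>
    rw [List.foldl_cons, ih]
    simp [List.replicate_succ]

theorem pv_getD_zip (x f : List Int) (h : x.length ≤ f.length) (i : Int)
    (h0 : 0 ≤ i) (h1 : i < (x.length : Int)) :
    PySem.List.pyGetD (x.zip f) i (0, 0) =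
      (PySem.List.pyGetD x i 0, PySem.List.pyGetD f i 0) := by
  have hz : (x.zip f).length = x.length := by simp [List.length_zip]; omega
  have hiz : i < (((x.zip f).length : Nat) : Int) := by omega
  have hif : i < ((f.length : Nat) : Int) := by
    have : (x.length : Int) ≤ f.length := by exact_mod_cast h
    omega
  rw [PySem.List.pyGetD_eq_getElem (x.zip f) (0, 0) h0 hiz,
      PySem.List.pyGetD_eq_getElem x 0 h0 h1,
      PySem.List.pyGetD_eq_getElem f 0 h0 hif]
  exact List.getElem_zip

-- A's accumulation equals the flatMap expansion of zip x f
theorem pv_A_expansion (x f : List Int) (h : x.length ≤ f.length) :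
    (PySem.List.pyRange 0 (x.length : Int) 1).foldl (fun s i =>
      (PySem.List.pyRange 0 (PySem.List.pyGetD f i 0) 1).foldl
        (fun s _ => s ++ [PySem.List.pyGetD x i 0]) s) []
    = (x.zip f).flatMap pvRep := by
  have hz : (((x.zip f).length : Nat) : Int) = ((x.length : Nat) : Int) := by
    simp [List.length_zip]; omega
  have hstep : (PySem.List.pyRange 0 (x.length : Int) 1).foldl (fun s i =>
      (PySem.List.pyRange 0 (PySem.List.pyGetD f i 0) 1).foldl
        (fun s _ => s ++ [PySem.List.pyGetD x i 0]) s) []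
      = (PySem.List.pyRange 0 (((x.zip f).length : Nat) : Int) 1).foldl
          (fun s i => s ++ pvRep (PySem.List.pyGetD (x.zip f) i (0, 0))) [] := by
    rw [hz]
    refine PySem.List.foldl_congr_mem _ _ _ _ (fun s i hi => ?_)
    have hmem := (PySem.List.mem_pyRange_one).mp hi
    rw [pv_inner_foldl, PySem.List.length_pyRange_one,
        pv_getD_zip x f h i hmem.1 hmem.2]
    simp [pvRep]
  rw [hstep, PySem.List.foldl_pyRange_zero_pyGetD' (x.zip f) (0, 0)
        (fun s p => s ++ pvRep p) [],
      PySem.List.foldl_append_eq_flatMap]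
  simp

-- pairs with non-positive frequency contribute nothing to the expansion
theorem pv_flatMap_filter (l : List (Int × Int)) :
    (l.filter (fun p => decide (0 < p.2))).flatMap pvRep = l.flatMap pvRep := by
  induction l with
  | nil => rfl
  | cons p t ih =>
    by_cases hp : 0 < p.2
    · simp [hp, ih]
    · have : p.2.toNat = 0 := by omega
      simp [hp, ih, pvRep, this]

-- B equals the flatMap expansion of the sorted positive-frequency pairs
theorem pv_B_expansion (x f : List Int) :
    construct_dataset_alt x f
    = (PySem.List.sorted ((x.zip f).filter (fun p => decide (0 < p.2)))
        (fun p => p.1) false).flatMap pvRep := by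
  unfold construct_dataset_alt
  rw [PySem.List.foldl_append_eq_flatMap]
  rfl

-- expanding a list of pairs ordered by first component gives an ordered list
theorem pv_pairwise_flatMap (l : List (Int × Int))
    (h : l.Pairwise (fun a b => a.1 ≤ b.1)) :
    (l.flatMap pvRep).Pairwise (· ≤ ·) := by
  induction l with
  | nil => simp
  | cons p t ih =>
    rw [List.flatMap_cons, List.pairwise_append]
    rcases (List.pairwise_cons.mp h) with ⟨hp, ht⟩
    refine ⟨List.pairwise_replicate.mpr (Or.inr le_rfl), ih ht, ?_⟩
    intro a ha b hb
    have ha' : a = p.1 := List.eq_of_mem_replicate ha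
    rcases List.mem_flatMap.mp hb with ⟨q, hq, hbq⟩
    have hb' : b = q.1 := List.eq_of_mem_replicate hbq
    rw [ha', hb']; exact hp q hq

-- ===== VERDICT (by name: the statement is the Claim_ definition above) =====
theorem construct_dataset_spec : Claim_equal_construct_dataset := by
  intro x f _ hpre
  unfold Spec_construct_dataset construct_dataset
  simp only []
  rw [pv_A_expansion x f hpre, ← pv_flatMap_filter (x.zip f), pv_B_expansion x f]
  exact PySem.List.sorted_id_eq_of_perm_of_pairwise _ _
    ((PySem.List.sorted_perm ((x.zip f).filter (fun p => decide (0 < p.2))) (fun p => p.1)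
        false).flatMap (fun a _ => List.Perm.refl (pvRep a)))
    (pv_pairwise_flatMap _
      (PySem.List.sorted_pairwise ((x.zip f).filter (fun p => decide (0 < p.2))) (fun p => p.1)))
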